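-- pv_equiv track=rewrite | github.com/jessicamelise/Atividades-Faculdade-Impacta-ADS | Semestre 2/numeros/numeros.py | conta_primos
-- ===== SOURCE A (Python) =====
-- def eh_primo(n):
--     """Função que verifica se um número é primo
--
--     Recebe um número natural n, com n >= 2, e retorna verdadeiro se
--     n é um número primo e falso caso contrário.
--
--     Exemplos
--     --------
--     Um número é dito primo se possuir apenas 2 divisores, isto é,
--     não possuir nenhum divisor além do 1 e do próprio n.
--     29 é primo:
--         divisores de 29: 1, 29
--     30 NÃO é primo:
--         divisores de 30: 1, 2, 3, 5, 6, 10, 15, 30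
--
--     Parâmetros
--     ----------
--     n : int
--         Número natural a ser testado.
--
--     Retorno
--     -------
--     bool
--         True se n for um número primo e False caso contrário.
--     """
--     if n == 1:
--         return False
--     else:
--         quantidade = 0
--         for numero in range(1, n+1):
--             if  n % numero == 0:
--                 quantidade += 1
--
--         if quantidade > 2:
--             return False
--         else:
--             return True
--
-- def conta_primos(s):
--     """Função que conta a quantidade de primos em uma sequẽncia
--
--     Recebe uma sequência de números naturais s e retorna
--     um dicionário com a contagem de ocorrências de cada número
--     primo da sequência. Números não primos devem ser ignorados.
--     Os números da sequência serão sempre maiores ou iguais a 2.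
--
--     Exemplos
--     --------
--     Caso s = [11, 2, 3, 4, 11, 2, 5, 2]
--         O retorno deverá ser: {2: 3, 3: 1, 5: 1, 11: 2}
--     Caso s = [1, 4, 8, 10]
--         O retorno deverá ser: {}
--     Caso s = (111, 191, 202, 306, 239, 579)
--         O retorno deverá ser: {191: 1, 239: 1}
--
--     Parâmetros
--     ----------
--     s : list | tuple
--         itens : int
--         descrição : Uma sequência arbitrária de números naturais.
--
--     Retorno
--     -------
--     dict
--         chave : int
--         valor : int
--         descrição : a chave é o número primo e o valor
--             o total de ocorrências do número primo na
--             sequência s.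
--     """
--     dicionario = {}
--     for numero in s:
--         if eh_primo(numero):
--             if numero in dicionario.keys():
--                 dicionario[numero] += 1
--             else:
--                 dicionario[numero] = 1
--     return dicionario
-- ===== SOURCE B (Python) =====
-- def eh_primo(n):
--     if n == 1:
--         return False
--     d = 2
--     while d * d <= n:
--         if n % d == 0:
--             return False
--         d += 1
--     return True
--
-- def conta_primos(s):
--     contagem = {}
--     for numero in s:
--         if eh_primo(numero):
--             contagem[numero] = contagem.get(numero, 0) + 1
--     return contagem
-- ===== Notes on version B (the rewrite author's own statement) =====
-- stated objective: faster
-- what changed: eh_primo's full 1..n divisor-counting loop is replaced by sqrt(n)-bounded trial division with early return (its vacuous loop agrees with A's empty-range count for n <= 0), and the dict accumulation uses a single get-based update instead of a keys-membership branch.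
import Mathlib
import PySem

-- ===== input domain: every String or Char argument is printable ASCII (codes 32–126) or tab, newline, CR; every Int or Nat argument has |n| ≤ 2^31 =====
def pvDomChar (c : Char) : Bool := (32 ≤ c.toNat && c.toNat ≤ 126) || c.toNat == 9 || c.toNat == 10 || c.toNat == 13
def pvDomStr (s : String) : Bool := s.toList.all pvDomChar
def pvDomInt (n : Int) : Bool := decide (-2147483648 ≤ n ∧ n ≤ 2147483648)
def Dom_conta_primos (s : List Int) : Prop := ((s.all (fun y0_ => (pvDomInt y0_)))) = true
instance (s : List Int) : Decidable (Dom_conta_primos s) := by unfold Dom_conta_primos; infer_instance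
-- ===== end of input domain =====

-- B replaces A's full 1..n divisor-counting primality test by √n-bounded trial division with
-- early return (same values everywhere, including the vacuous n ≤ 0 loops), and accumulates the
-- count dict with a single get-based update; proved extensionally equal on the whole domain.


-- ===== PORT A =====
def eh_primo (n : Int) : Bool :=
  if n == 1 then false
  else
    let quantidade := (PySem.List.pyRange 1 (n + 1) 1).foldl
      (fun quantidade numero => if PySem.Int.mod n numero == 0 then quantidade + 1 else quantidade) (0 : Int)
    if quantidade > 2 then false else true

def conta_primos (s : List Int) : List (Int × Int) :=
  (s.foldl
    (fun dicionario numero =>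
      if eh_primo numero then
        if dicionario.contains numero then
          dicionario.insert numero (dicionario.getD numero 0 + 1)
        else
          dicionario.insert numero 1
      else dicionario)
    (PySem.Dict.empty : PySem.Dict Int Int)).items

-- ===== PORT B =====
def trialLoop (n d : Int) (hd : 2 ≤ d) : Bool :=
  if h : d * d ≤ n then
    if PySem.Int.mod n d == 0 then false
    else trialLoop n (d + 1) (by omega)
  else true
termination_by (n - d).toNat
decreasing_by
  have hdd : d + d ≤ d * d := by nlinarith
  omega

def eh_primo_alt (n : Int) : Bool :=
  if n == 1 then false
  else trialLoop n 2 (by omega)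

def conta_primos_alt (s : List Int) : List (Int × Int) :=
  (s.foldl
    (fun contagem numero =>
      if eh_primo_alt numero then
        contagem.insert numero (contagem.getD numero 0 + 1)
      else contagem)
    (PySem.Dict.empty : PySem.Dict Int Int)).items

-- ===== PRECONDITION & SPEC =====
def Spec_conta_primos (s : List Int) (out : List (Int × Int)) : Prop := out = conta_primos_alt s
instance (s : List Int) (out : List (Int × Int)) : Decidable (Spec_conta_primos s out) := by unfold Spec_conta_primos; infer_instance

-- ===== CLAIM (what is proved, stated in full; the proofs are below) =====
def Claim_equal_conta_primos : Prop := ∀ (s : List Int), Dom_conta_primos s → Spec_conta_primos s (conta_primos s)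

-- ===== LEMMAS AND PROOFS =====

-- trialLoop n d = true iff no e ≥ d with e*e ≤ n divides n
lemma trialLoop_eq_true_iff (n d : Int) (hd : 2 ≤ d) :
    trialLoop n d hd = true ↔ ∀ e : Int, d ≤ e → e * e ≤ n → ¬ e ∣ n := by
  fun_induction trialLoop n d hd with
  | case1 d hd h hm =>
    refine iff_of_false (by simp) ?_
    intro hall
    exact hall d le_rfl h ((PySem.Int.mod_eq_zero_iff_dvd n d).1 (by simpa using hm))
  | case2 d hd h hm ih =>
    rw [ih]
    constructor
    · intro hall e hde hee
      rcases eq_or_lt_of_le hde with rfl | hlt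
      · intro hdvd
        exact hm (by simp [(PySem.Int.mod_eq_zero_iff_dvd n d).2 hdvd])
      · exact hall e (by omega) hee
    · intro hall e hde hee
      exact hall e (by omega) hee
  | case3 d hd h =>
    refine iff_of_true rfl ?_
    intro e hde hee
    nlinarith

-- For n ≥ 2, primality of n.toNat is the √n-bounded no-divisor condition over Int
lemma prime_iff_sqrt (n : Int) (hn : 2 ≤ n) :
    Nat.Prime n.toNat ↔ ∀ e : Int, 2 ≤ e → e * e ≤ n → ¬ e ∣ n := by
  have hn' : ((n.toNat : Int)) = n := Int.toNat_of_nonneg (by omega)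
  rw [Nat.prime_def_le_sqrt]
  constructor
  · rintro ⟨-, hall⟩ e he hee hdvd
    have he' : ((e.toNat : Int)) = e := Int.toNat_of_nonneg (by omega)
    refine hall e.toNat (by omega) (Nat.le_sqrt.2 ?_) ?_
    · have : ((e.toNat * e.toNat : Nat) : Int) ≤ ((n.toNat : Nat) : Int) := by
        push_cast
        rw [he', hn']
        exact hee
      exact_mod_cast this
    · exact Int.natCast_dvd_natCast.1 (by rw [he', hn']; exact hdvd)
  · intro hall
    refine ⟨by omega, ?_⟩
    intro k hk hks hdvd
    refine hall (k : Int) (by exact_mod_cast hk) ?_ ?_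
    · have : ((k * k : Nat) : Int) ≤ ((n.toNat : Nat) : Int) := by
        exact_mod_cast Nat.le_sqrt.1 hks
      rw [hn'] at this
      exact_mod_cast this
    · rw [← hn']
      exact_mod_cast hdvd

-- For n ≥ 2, primality of n.toNat says the 1..n divisor list has at most two entries
lemma prime_iff_count (n : Int) (hn : 2 ≤ n) :
    Nat.Prime n.toNat ↔
      (List.countP (fun x => PySem.Int.mod n x == 0) (PySem.List.pyRange 1 (n + 1) 1) : Int) ≤ 2 := by
  have hn' : ((n.toNat : Int)) = n := Int.toNat_of_nonneg (by omega)
  set l := PySem.List.pyRange 1 (n + 1) 1 with hl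
  set p : Int → Bool := fun x => PySem.Int.mod n x == 0 with hp
  have hmemf : ∀ x : Int, x ∈ l.filter p ↔ (1 ≤ x ∧ x ≤ n) ∧ x ∣ n := by
    intro x
    rw [List.mem_filter, hl, PySem.List.mem_pyRange_one, hp]
    simp only [beq_iff_eq, PySem.Int.mod_eq_zero_iff_dvd]
    constructor
    · rintro ⟨⟨a, b⟩, c⟩; exact ⟨⟨a, by omega⟩, c⟩
    · rintro ⟨⟨a, b⟩, c⟩; exact ⟨⟨a, by omega⟩, c⟩
  have hnodup : (l.filter p).Nodup := (PySem.List.nodup_pyRange_one 1 (n + 1)).filter p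
  have hcard : (l.filter p).toFinset.card = (l.filter p).length :=
    List.toFinset_card_of_nodup hnodup
  rw [List.countP_eq_length_filter]
  constructor
  · intro hp'
    have hsub : (l.filter p).toFinset ⊆ ({1, n} : Finset Int) := by
      intro x hx
      rw [List.mem_toFinset, hmemf] at hx
      obtain ⟨⟨hx1, hxn⟩, hxd⟩ := hx
      by_contra hne
      simp only [Finset.mem_insert, Finset.mem_singleton, not_or] at hne
      have hx2 : 2 ≤ x := by omega
      have hxlt : x < n := by omega
      have hx' : ((x.toNat : Int)) = x := Int.toNat_of_nonneg (by omega)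
      refine (Nat.prime_def_lt'.1 hp').2 x.toNat (by omega) (by omega) ?_
      exact Int.natCast_dvd_natCast.1 (by rw [hx', hn']; exact hxd)
    have := Finset.card_le_card hsub
    rw [hcard] at this
    have h2 : ({1, n} : Finset Int).card ≤ 2 :=
      (Finset.card_insert_le 1 {n}).trans (by simp)
    omega
  · intro hlen
    by_contra hp'
    have hm2 : 2 ≤ n.toNat := by omega
    rw [Nat.prime_def_lt'] at hp'
    push Not at hp'
    obtain ⟨k, hk2, hkm, hkd⟩ := hp' hm2
    have he2 : (2 : Int) ≤ (k : Int) := by exact_mod_cast hk2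
    have hen : ((k : Int)) < n := by rw [← hn']; exact_mod_cast hkm
    have hed : ((k : Int)) ∣ n := by rw [← hn']; exact_mod_cast hkd
    have hmem1 : (1 : Int) ∈ l.filter p := (hmemf 1).2 ⟨⟨le_rfl, by omega⟩, one_dvd n⟩
    have hmeme : ((k : Int)) ∈ l.filter p := (hmemf k).2 ⟨⟨by omega, by omega⟩, hed⟩
    have hmemn : n ∈ l.filter p := (hmemf n).2 ⟨⟨by omega, le_rfl⟩, dvd_refl n⟩
    have hsub : ({1, (k : Int), n} : Finset Int) ⊆ (l.filter p).toFinset := by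
      intro x hx
      rw [List.mem_toFinset]
      rcases Finset.mem_insert.1 hx with rfl | hx
      · exact hmem1
      · rcases Finset.mem_insert.1 hx with rfl | hx
        · exact hmeme
        · rw [Finset.mem_singleton] at hx
          subst hx
          exact hmemn
    have h3 : ({1, (k : Int), n} : Finset Int).card = 3 := by
      rw [Finset.card_eq_three]
      exact ⟨1, (k : Int), n, by omega, by omega, by omega, rfl⟩
    have := Finset.card_le_card hsub
    rw [hcard, h3] at this
    omega

-- A's divisor count equals the length of the filtered range
lemma eh_primo_eq (n : Int) :
    eh_primo n = (decide (n ≤ 0) || decide (Nat.Prime n.toNat)) := by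
  unfold eh_primo
  by_cases h1 : n = 1
  · subst h1
    norm_num
  · rw [if_neg (by simpa using h1)]
    simp only [gt_iff_lt]
    rw [PySem.List.foldl_count_if (fun x => PySem.Int.mod n x == 0) (PySem.List.pyRange 1 (n + 1) 1) 0]
    by_cases hn : n ≤ 0
    · rw [PySem.List.pyRange_one_eq_nil (by omega)]
      simp [hn]
    · have h2 : 2 ≤ n := by omega
      have hiff := prime_iff_count n h2
      by_cases hp : Nat.Prime n.toNat
      · have := hiff.1 hp
        rw [if_neg (by omega)]
        simp [hn, hp]
      · have : ¬ ((List.countP (fun x => PySem.Int.mod n x == 0)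
            (PySem.List.pyRange 1 (n + 1) 1) : Int) ≤ 2) := fun h => hp (hiff.2 h)
        rw [if_pos (by omega)]
        simp [hn, hp]

lemma eh_primo_alt_eq (n : Int) :
    eh_primo_alt n = (decide (n ≤ 0) || decide (Nat.Prime n.toNat)) := by
  unfold eh_primo_alt
  by_cases h1 : n = 1
  · subst h1
    norm_num
  · rw [if_neg (by simpa using h1)]
    by_cases hn : n ≤ 0
    · have : trialLoop n 2 (by omega) = true :=
        (trialLoop_eq_true_iff n 2 (by omega)).2 (fun e he hee => by nlinarith)
      simp [this, hn]
    · have h2 : 2 ≤ n := by omega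
      have hiff : trialLoop n 2 (by omega) = true ↔ Nat.Prime n.toNat :=
        (trialLoop_eq_true_iff n 2 (by omega)).trans (prime_iff_sqrt n h2).symm
      by_cases hp : Nat.Prime n.toNat
      · simp [hn, hp, hiff.2 hp]
      · have : trialLoop n 2 (by omega) = false := by
          rcases Bool.eq_false_or_eq_true (trialLoop n 2 (by omega)) with h | h
          · exact absurd (hiff.1 h) hp
          · exact h
        simp [this, hn, hp]

lemma eh_primo_agree (n : Int) : eh_primo n = eh_primo_alt n := by
  rw [eh_primo_eq, eh_primo_alt_eq]

-- ===== VERDICT (by name: the statement is the Claim_ definition above) =====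
theorem conta_primos_spec : Claim_equal_conta_primos := by
  intro s _
  unfold Spec_conta_primos conta_primos conta_primos_alt
  congr 1
  apply PySem.List.foldl_congr_mem
  intro d x _
  rw [eh_primo_agree]
  by_cases h : eh_primo_alt x = true
  · simp only [h, if_true]
    by_cases hc : d.contains x
    · simp [hc]
    · rw [if_neg hc, PySem.Dict.getD_of_not_contains d 0 (by simpa using hc)]
      norm_num
  · simp [h]
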